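-- pv_equiv track=rewrite | github.com/JonathanRivas457/TuneTracker | core.py | convert_to_flat
-- ===== SOURCE A (Python) =====
-- def convert_to_flat(note):
--     # Create dictionary for each sharp's corresponding flat
--     sharp_to_flat = {
--         'C#': 'Db',
--         'D#': 'Eb',
--         'F#': 'Gb',
--         'G#': 'Ab',
--         'A#': 'Bb'
--     }
--
--     # find sharp and convert it to its respective flat
--     for key, value in sharp_to_flat.items():
--         if key in note:
--             # Return replacement
--             note = note.replace(key, sharp_to_flat[key])
--
--     return note
-- ===== SOURCE B (Python) =====
-- def convert_to_flat(note):
--     # Single left-to-right pass: emit the flat for each "<letter>#" pair, copy other chars.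
--     flats = {'C': 'Db', 'D': 'Eb', 'F': 'Gb', 'G': 'Ab', 'A': 'Bb'}
--     out = []
--     i = 0
--     n = len(note)
--     while i < n:
--         c = note[i]
--         if i + 1 < n and note[i + 1] == '#' and c in flats:
--             out.append(flats[c])
--             i += 2
--         else:
--             out.append(c)
--             i += 1
--     return ''.join(out)
-- ===== Notes on version B (the rewrite author's own statement) =====
-- stated objective: alternative
-- what changed: A makes five sequential whole-string str.replace passes (one per sharp in the dict); B builds the result in one left-to-right scan, emitting the mapped flat whenever a sharp letter is immediately followed by a hash and copying every other character.
import Mathlib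
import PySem

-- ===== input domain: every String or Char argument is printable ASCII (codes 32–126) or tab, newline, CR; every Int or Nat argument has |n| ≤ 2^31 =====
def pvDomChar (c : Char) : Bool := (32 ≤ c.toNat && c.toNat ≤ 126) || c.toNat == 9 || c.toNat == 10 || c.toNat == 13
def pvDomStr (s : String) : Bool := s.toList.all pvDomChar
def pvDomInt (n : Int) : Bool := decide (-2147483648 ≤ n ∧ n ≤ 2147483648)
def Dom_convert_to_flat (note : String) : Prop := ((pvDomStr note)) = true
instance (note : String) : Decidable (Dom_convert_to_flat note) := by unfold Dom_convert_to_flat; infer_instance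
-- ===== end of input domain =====

-- B replaces A's five sequential whole-string str.replace passes by one left-to-right scan
-- that rewrites each "<letter>#" pair as it goes (objective: alternative single-pass algorithm).


-- ===== PORT A =====
-- the dict literal, in insertion order
def sharpToFlatA : PySem.Dict String String :=
  PySem.Dict.ofList [("C#", "Db"), ("D#", "Eb"), ("F#", "Gb"), ("G#", "Ab"), ("A#", "Bb")]

-- `sharp_to_flat[key]` is ported as getD with an unused default: every key looked up
-- comes from the dict's own items, so the KeyError branch is unreachable.
def convert_to_flat (note : String) : String :=
  sharpToFlatA.items.foldl
    (fun note kv =>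
      if PySem.Str.isIn kv.1 note then PySem.Str.replace note kv.1 (sharpToFlatA.getD kv.1 "")
      else note)
    note

-- ===== PORT B =====
-- flats[c] lookup of Source B ('c in flats' and the value), as an Option
def flatOf? (c : Char) : Option (Char × Char) :=
  if c = 'C' then some ('D', 'b')
  else if c = 'D' then some ('E', 'b')
  else if c = 'F' then some ('G', 'b')
  else if c = 'G' then some ('A', 'b')
  else if c = 'A' then some ('B', 'b')
  else none

-- Source B's while loop: one pass, consuming two chars on "<letter>#", else one
def scanFlats : List Char → List Char
  | [] => []
  | [c] => [c]
  | c :: d :: t =>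
    if d = '#' then
      match flatOf? c with
      | some (y1, y2) => y1 :: y2 :: scanFlats t
      | none => c :: scanFlats (d :: t)
    else c :: scanFlats (d :: t)

def convert_to_flat_alt (note : String) : String := String.ofList (scanFlats note.toList)

-- ===== PRECONDITION & SPEC =====
def Spec_convert_to_flat (note : String) (out : String) : Prop := out = convert_to_flat_alt note
instance (note : String) (out : String) : Decidable (Spec_convert_to_flat note out) := by unfold Spec_convert_to_flat; infer_instance

-- ===== CLAIM (what is proved, stated in full; the proofs are below) =====
def Claim_equal_convert_to_flat : Prop := ∀ (note : String), Dom_convert_to_flat note → Spec_convert_to_flat note (convert_to_flat note)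

-- ===== LEMMAS AND PROOFS =====

-- one str.replace pass for the two-char pattern [x, '#'] → [y1, y2], written structurally
def rep2 (x y1 y2 : Char) : List Char → List Char
  | [] => []
  | [c] => [c]
  | c :: d :: t => if c = x ∧ d = '#' then y1 :: y2 :: rep2 x y1 y2 t else c :: rep2 x y1 y2 (d :: t)

theorem go_spec (x y1 y2 : Char) (fuel : Nat) (l acc : List Char) (h : l.length ≤ fuel) :
    PySem.Chars.replace.go [x, '#'] [y1, y2] fuel l acc = acc.reverse ++ rep2 x y1 y2 l := by
  induction fuel generalizing l acc with
  | zero =>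
    have hl : l = [] := List.eq_nil_of_length_eq_zero (Nat.le_zero.mp h)
    subst hl
    simp [PySem.Chars.replace.go, rep2]
  | succ fuel ih =>
    match l with
    | [] => simp [PySem.Chars.replace.go, rep2]
    | [c] =>
      have hpre : ([x, '#'].isPrefixOf [c]) = false := by simp [List.isPrefixOf]
      rw [PySem.Chars.replace.go.eq_def]
      simp only [hpre, Bool.false_eq_true, if_false]
      rw [ih [] (c :: acc) (by simp)]
      simp [rep2]
    | c :: d :: t =>
      rw [PySem.Chars.replace.go.eq_def]
      by_cases hcd : c = x ∧ d = '#'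
      · have hpre : ([x, '#'].isPrefixOf (c :: d :: t)) = true := by
          simp [List.isPrefixOf, hcd.1, hcd.2]
        simp only [hpre, if_true]
        rw [show List.drop [x, '#'].length (c :: d :: t) = t from rfl]
        rw [ih t ([y1, y2].reverse ++ acc) (by simp at h ⊢; omega)]
        simp [rep2, if_pos hcd]
      · have hpre : ([x, '#'].isPrefixOf (c :: d :: t)) = false := by
          simp only [List.isPrefixOf, Bool.and_eq_false_iff]
          rcases Decidable.em (c = x) with hc | hc
          · refine Or.inr (Or.inl ?_)
            simp only [beq_eq_false_iff_ne, ne_eq]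
            intro hd
            exact hcd ⟨hc, hd.symm⟩
          · exact Or.inl (by simp [beq_eq_false_iff_ne]; exact fun h => hc h.symm)
        simp only [hpre, Bool.false_eq_true, if_false]
        rw [ih (d :: t) (c :: acc) (by simp at h ⊢; omega)]
        simp [rep2, if_neg hcd]

theorem replace_eq_rep2 (x y1 y2 : Char) (l : List Char) :
    PySem.Chars.replace l [x, '#'] [y1, y2] = rep2 x y1 y2 l := by
  rw [PySem.Chars.replace]
  simp only [List.isEmpty_cons, if_neg Bool.false_ne_true]
  simpa using go_spec x y1 y2 l.length l [] (le_refl _)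

theorem rep2_of_not_isIn (x y1 y2 : Char) (l : List Char)
    (h : PySem.Chars.isIn [x, '#'] l = false) : rep2 x y1 y2 l = l := by
  have hinf : ¬ ([x, '#'] <:+: l) := by
    intro hi
    rw [← PySem.Chars.isIn_iff_infix] at hi
    simp [h] at hi
  clear h
  induction l using rep2.induct x with
  | case1 => simp [rep2]
  | case2 c => simp [rep2]
  | case3 c d t hcd ih =>
    exfalso
    obtain ⟨hc, hd⟩ := hcd
    subst hc; subst hd
    exact hinf ⟨[], t, by simp⟩
  | case4 c d t hcd ih =>
    rw [rep2, if_neg hcd]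
    rw [ih (fun hi => hinf (hi.trans (List.suffix_cons c (d :: t)).isInfix))]

-- A's guarded replace step equals one unconditional rep2 pass
theorem guard_eq (x y1 y2 : Char) (l : List Char) :
    (if PySem.Chars.isIn [x, '#'] l then PySem.Chars.replace l [x, '#'] [y1, y2] else l)
      = rep2 x y1 y2 l := by
  by_cases h : PySem.Chars.isIn [x, '#'] l = true
  · rw [if_pos h, replace_eq_rep2]
  · rw [if_neg h, rep2_of_not_isIn x y1 y2 l (Bool.not_eq_true _ ▸ h)]

-- pass-through: a cons is copied when the tail does not start with '#'
theorem rep2_pass_nohash (x y1 y2 c : Char) (m : List Char) (h : m.head? ≠ some '#') :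
    rep2 x y1 y2 (c :: m) = c :: rep2 x y1 y2 m := by
  match m with
  | [] => simp [rep2]
  | d :: t =>
    have hd : d ≠ '#' := by simpa using h
    rw [rep2, if_neg (by rintro ⟨_, h2⟩; exact hd h2)]

-- pass-through: a cons is copied when its head is not the pattern's letter
theorem rep2_pass_ne (x y1 y2 c : Char) (m : List Char) (h : c ≠ x) :
    rep2 x y1 y2 (c :: m) = c :: rep2 x y1 y2 m := by
  match m with
  | [] => simp [rep2]
  | d :: t => rw [rep2, if_neg (by rintro ⟨h1, _⟩; exact h h1)]

-- two chars pass through when the second is neither '#' nor the pattern's letter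
theorem rep2_pass_pair (x y1 y2 a b : Char) (m : List Char) (hb : b ≠ '#') (hbx : b ≠ x) :
    rep2 x y1 y2 (a :: b :: m) = a :: b :: rep2 x y1 y2 m := by
  rw [rep2_pass_nohash x y1 y2 a (b :: m) (by simp [hb]), rep2_pass_ne x y1 y2 b m hbx]

-- two chars pass through when neither is the pattern's letter
theorem rep2_pass_pair_ne (x y1 y2 a b : Char) (m : List Char) (hax : a ≠ x) (hbx : b ≠ x) :
    rep2 x y1 y2 (a :: b :: m) = a :: b :: rep2 x y1 y2 m := by
  rw [rep2_pass_ne x y1 y2 a (b :: m) hax, rep2_pass_ne x y1 y2 b m hbx]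

theorem rep2_fire (x y1 y2 : Char) (t : List Char) :
    rep2 x y1 y2 (x :: '#' :: t) = y1 :: y2 :: rep2 x y1 y2 t := by
  rw [rep2, if_pos ⟨rfl, rfl⟩]

-- a pass never creates a leading '#'
theorem rep2_head_nohash (x y1 y2 : Char) (hy : y1 ≠ '#')
    (m : List Char) (h : m.head? ≠ some '#') : (rep2 x y1 y2 m).head? ≠ some '#' := by
  match m with
  | [] => simp [rep2]
  | [c] => simpa [rep2] using h
  | c :: d :: t =>
    rw [rep2]
    by_cases hcd : c = x ∧ d = '#'
    · rw [if_pos hcd]; simpa using hy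
    · rw [if_neg hcd]; simpa using h

-- the five passes of A, innermost applied first (dict order C#, D#, F#, G#, A#)
def compA (l : List Char) : List Char :=
  rep2 'A' 'B' 'b' (rep2 'G' 'A' 'b' (rep2 'F' 'G' 'b' (rep2 'D' 'E' 'b' (rep2 'C' 'D' 'b' l))))

theorem compA_eq_scanFlats (l : List Char) : compA l = scanFlats l := by
  induction l using scanFlats.induct with
  | case1 => simp [compA, rep2, scanFlats]
  | case2 c => simp [compA, rep2, scanFlats]
  | case3 c t y1 y2 hf ih =>
    have hs : scanFlats (c :: '#' :: t) = y1 :: y2 :: scanFlats t := by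
      rw [scanFlats]; simp [hf]
    -- c is one of the five sharp letters
    have hc : c = 'C' ∧ (y1, y2) = ('D', 'b') ∨ c = 'D' ∧ (y1, y2) = ('E', 'b') ∨
        c = 'F' ∧ (y1, y2) = ('G', 'b') ∨ c = 'G' ∧ (y1, y2) = ('A', 'b') ∨
        c = 'A' ∧ (y1, y2) = ('B', 'b') := by
      unfold flatOf? at hf
      split_ifs at hf <;> simp_all <;> exact ⟨hf.1.symm, hf.2.symm⟩
    rw [hs]
    unfold compA at ih ⊢
    rcases hc with ⟨hc, hy⟩ | ⟨hc, hy⟩ | ⟨hc, hy⟩ | ⟨hc, hy⟩ | ⟨hc, hy⟩ <;>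
      (subst hc; injection hy with hy1 hy2; subst hy1; subst hy2)
    · rw [rep2_fire 'C' 'D' 'b' t,
        rep2_pass_pair 'D' 'E' 'b' 'D' 'b' _ (by decide) (by decide),
        rep2_pass_pair 'F' 'G' 'b' 'D' 'b' _ (by decide) (by decide),
        rep2_pass_pair 'G' 'A' 'b' 'D' 'b' _ (by decide) (by decide),
        rep2_pass_pair 'A' 'B' 'b' 'D' 'b' _ (by decide) (by decide), ih]
    · rw [rep2_pass_pair_ne 'C' 'D' 'b' 'D' '#' _ (by decide) (by decide),
        rep2_fire 'D' 'E' 'b',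
        rep2_pass_pair 'F' 'G' 'b' 'E' 'b' _ (by decide) (by decide),
        rep2_pass_pair 'G' 'A' 'b' 'E' 'b' _ (by decide) (by decide),
        rep2_pass_pair 'A' 'B' 'b' 'E' 'b' _ (by decide) (by decide), ih]
    · rw [rep2_pass_pair_ne 'C' 'D' 'b' 'F' '#' _ (by decide) (by decide),
        rep2_pass_pair_ne 'D' 'E' 'b' 'F' '#' _ (by decide) (by decide),
        rep2_fire 'F' 'G' 'b',
        rep2_pass_pair 'G' 'A' 'b' 'G' 'b' _ (by decide) (by decide),
        rep2_pass_pair 'A' 'B' 'b' 'G' 'b' _ (by decide) (by decide), ih]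
    · rw [rep2_pass_pair_ne 'C' 'D' 'b' 'G' '#' _ (by decide) (by decide),
        rep2_pass_pair_ne 'D' 'E' 'b' 'G' '#' _ (by decide) (by decide),
        rep2_pass_pair_ne 'F' 'G' 'b' 'G' '#' _ (by decide) (by decide),
        rep2_fire 'G' 'A' 'b',
        rep2_pass_pair 'A' 'B' 'b' 'A' 'b' _ (by decide) (by decide), ih]
    · rw [rep2_pass_pair_ne 'C' 'D' 'b' 'A' '#' _ (by decide) (by decide),
        rep2_pass_pair_ne 'D' 'E' 'b' 'A' '#' _ (by decide) (by decide),
        rep2_pass_pair_ne 'F' 'G' 'b' 'A' '#' _ (by decide) (by decide),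
        rep2_pass_pair_ne 'G' 'A' 'b' 'A' '#' _ (by decide) (by decide),
        rep2_fire 'A' 'B' 'b', ih]
  | case4 c t hf ih =>
    have hs : scanFlats (c :: '#' :: t) = c :: scanFlats ('#' :: t) := by
      rw [scanFlats]; simp [hf]
    have hcC : c ≠ 'C' := by intro h; subst h; simp [flatOf?] at hf
    have hcD : c ≠ 'D' := by intro h; subst h; simp [flatOf?] at hf
    have hcF : c ≠ 'F' := by intro h; subst h; simp [flatOf?] at hf
    have hcG : c ≠ 'G' := by intro h; subst h; simp [flatOf?] at hf
    have hcA : c ≠ 'A' := by intro h; subst h; simp [flatOf?] at hf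
    rw [hs]
    unfold compA at ih ⊢
    rw [rep2_pass_ne _ _ _ _ _ hcC, rep2_pass_ne _ _ _ _ _ hcD,
      rep2_pass_ne _ _ _ _ _ hcF, rep2_pass_ne _ _ _ _ _ hcG,
      rep2_pass_ne _ _ _ _ _ hcA, ih]
  | case5 c d t hd ih =>
    rw [scanFlats, if_neg hd]
    have h0 : (d :: t).head? ≠ some '#' := by simpa using hd
    have h1 := rep2_head_nohash 'C' 'D' 'b' (by decide) _ h0
    have h2 := rep2_head_nohash 'D' 'E' 'b' (by decide) _ h1
    have h3 := rep2_head_nohash 'F' 'G' 'b' (by decide) _ h2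
    have h4 := rep2_head_nohash 'G' 'A' 'b' (by decide) _ h3
    unfold compA at ih ⊢
    rw [rep2_pass_nohash _ _ _ _ _ h0, rep2_pass_nohash _ _ _ _ _ h1,
      rep2_pass_nohash _ _ _ _ _ h2, rep2_pass_nohash _ _ _ _ _ h3,
      rep2_pass_nohash _ _ _ _ _ h4, ih]

theorem convA_toList (note : String) : (convert_to_flat note).toList = compA note.toList := by
  unfold convert_to_flat
  show (List.foldl _ note [("C#", "Db"), ("D#", "Eb"), ("F#", "Gb"), ("G#", "Ab"), ("A#", "Bb")]).toList = _
  simp only [List.foldl]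
  unfold compA
  have step : ∀ (k v : String) (x y1 y2 : Char) (s : String), k.toList = [x, '#'] → v.toList = [y1, y2] →
      (if PySem.Str.isIn k s then PySem.Str.replace s k v else s).toList
        = rep2 x y1 y2 s.toList := by
    intro k v x y1 y2 s hk hv
    rw [← guard_eq x y1 y2 s.toList]
    by_cases h : PySem.Str.isIn k s = true
    · have h' : PySem.Chars.isIn [x, '#'] s.toList = true := by
        rw [← hk]; exact h
      rw [if_pos h, if_pos h', PySem.Str.toList_replace, hk, hv]
    · have h' : ¬ PySem.Chars.isIn [x, '#'] s.toList = true := by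
        rw [← hk]; exact h
      rw [if_neg h, if_neg h']
  rw [step _ _ 'A' 'B' 'b' _ rfl rfl, step _ _ 'G' 'A' 'b' _ rfl rfl,
    step _ _ 'F' 'G' 'b' _ rfl rfl, step _ _ 'D' 'E' 'b' _ rfl rfl,
    step _ _ 'C' 'D' 'b' _ rfl rfl]

-- ===== VERDICT (by name: the statement is the Claim_ definition above) =====
theorem convert_to_flat_spec : Claim_equal_convert_to_flat := by
  intro note _
  unfold Spec_convert_to_flat convert_to_flat_alt
  apply String.toList_inj.mp
  rw [convA_toList, compA_eq_scanFlats]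
  exact String.toList_ofList.symm
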